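-- pv_equiv track=rewrite | github.com/MarcOrtiz21/WeatherTrading-Evo | scripts/run_cohort_overlay_diagnostics.py | infer_latest_mature_cohort
-- ===== SOURCE A (Python) =====
-- def infer_latest_mature_cohort(audit_snapshot: dict) -> str:
--     matured = sorted(
--         {
--             str(row.get("snapshot_as_of_date"))
--             for row in audit_snapshot.get("evaluations", [])
--             if row.get("snapshot_as_of_date")
--         }
--     )
--     if not matured:
--         raise ValueError("La auditoria no contiene cohortes maduras.")
--     return matured[-1]
-- ===== SOURCE B (Python) =====
-- def infer_latest_mature_cohort(audit_snapshot: dict) -> str: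
--     best = None
--     for row in audit_snapshot.get("evaluations", []):
--         v = row.get("snapshot_as_of_date")
--         if not v:
--             continue
--         s = str(v)
--         if best is None or s > best:
--             best = s
--     if best is None:
--         raise ValueError("La auditoria no contiene cohortes maduras.")
--     return best
-- ===== Notes on version B (the rewrite author's own statement) =====
-- stated objective: simpler
-- what changed: Replaces build-a-set-then-sort-then-index-last with a single linear scan that keeps a running lexicographic maximum (no set, no sort).
import Mathlib
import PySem

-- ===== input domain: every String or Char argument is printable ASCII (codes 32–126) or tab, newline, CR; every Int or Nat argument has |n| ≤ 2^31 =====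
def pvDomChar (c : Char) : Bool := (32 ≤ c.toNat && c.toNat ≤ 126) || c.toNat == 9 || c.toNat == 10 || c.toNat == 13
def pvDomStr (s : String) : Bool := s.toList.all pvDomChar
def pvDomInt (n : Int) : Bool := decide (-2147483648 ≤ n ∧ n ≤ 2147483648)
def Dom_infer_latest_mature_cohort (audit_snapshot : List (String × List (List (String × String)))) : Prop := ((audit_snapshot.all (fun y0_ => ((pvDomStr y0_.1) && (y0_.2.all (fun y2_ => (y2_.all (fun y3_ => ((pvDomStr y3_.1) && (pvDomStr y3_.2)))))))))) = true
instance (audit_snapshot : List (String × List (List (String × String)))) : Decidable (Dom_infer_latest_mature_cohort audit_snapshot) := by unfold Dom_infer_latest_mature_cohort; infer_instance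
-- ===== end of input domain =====

-- B replaces A's build-a-set / sort / take-last by one linear scan keeping a running lexicographic maximum (simpler; same result).

-- row.get("snapshot_as_of_date") — shared trivial accessor
def pvRowDate (row : List (String × String)) : Option String :=
  PySem.Dict.get? (PySem.Dict.mk row) "snapshot_as_of_date"

-- A-side helper: the comprehension's body+filter, 'str(row.get(k)) … if row.get(k)' (str(s) = s for a truthy string)
def pvDateOf (row : List (String × String)) : Option String :=
  match pvRowDate row with
  | some s => if s = "" then none else some s
  | none => none

-- ===== PORT A =====
def infer_latest_mature_cohort (audit_snapshot : List (String × List (List (String × String)))) : String :=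
  -- matured = sorted({str(row.get(k)) for row in audit_snapshot.get("evaluations", []) if row.get(k)})
  -- 'if not matured: raise ValueError(…)' is excluded by Pre_; 'return matured[-1]'
  PySem.List.pyGetD
    (PySem.List.sorted
      (PySem.Set.ofList
        ((PySem.Dict.getD (PySem.Dict.mk audit_snapshot) "evaluations" []).filterMap pvDateOf))
      (fun x => x) false)
    (-1) ""

-- ===== PORT B =====
def infer_latest_mature_cohort_alt (audit_snapshot : List (String × List (List (String × String)))) : String :=
  match (PySem.Dict.getD (PySem.Dict.mk audit_snapshot) "evaluations" []).foldl
      (fun best row => match pvRowDate row with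
        | none => best                                     -- 'if not v: continue'
        | some v => if v = "" then best                    -- '' is falsy too
            else match best with
              | none => some v                             -- 'best is None'
              | some b => if b < v then some v else best)  -- 's > best'
      none with
  | some b => b
  | none => ""   -- Python B raises ValueError here, like A; excluded by Pre_

-- ===== PRECONDITION & SPEC =====
-- Pre_ excludes exactly the inputs with no truthy "snapshot_as_of_date" in any evaluation row,
-- on which both Pythons raise the same ValueError.
def Pre_infer_latest_mature_cohort (audit_snapshot : List (String × List (List (String × String)))) : Prop :=
  ((PySem.Dict.getD (PySem.Dict.mk audit_snapshot) "evaluations" []).any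
    (fun row => ((PySem.Dict.get? (PySem.Dict.mk row) "snapshot_as_of_date").getD "") ≠ "")) = true
instance (audit_snapshot : List (String × List (List (String × String)))) : Decidable (Pre_infer_latest_mature_cohort audit_snapshot) := by unfold Pre_infer_latest_mature_cohort; infer_instance

def pvWitness_infer_latest_mature_cohort : (List (String × List (List (String × String)))) :=
  [("evaluations", [[("snapshot_as_of_date", "2024-01-01")], [("snapshot_as_of_date", "2023-06-30")]])]

def Spec_infer_latest_mature_cohort (audit_snapshot : List (String × List (List (String × String)))) (out : String) : Prop := out = infer_latest_mature_cohort_alt audit_snapshot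
instance (audit_snapshot : List (String × List (List (String × String)))) (out : String) : Decidable (Spec_infer_latest_mature_cohort audit_snapshot out) := by unfold Spec_infer_latest_mature_cohort; infer_instance

-- ===== CLAIM (what is proved, stated in full; the proofs are below) =====
def Claim_equal_infer_latest_mature_cohort : Prop := ∀ (audit_snapshot : List (String × List (List (String × String)))), Dom_infer_latest_mature_cohort audit_snapshot → Pre_infer_latest_mature_cohort audit_snapshot → Spec_infer_latest_mature_cohort audit_snapshot (infer_latest_mature_cohort audit_snapshot)

-- ===== LEMMAS AND PROOFS =====

-- the running-max step on the filtered date strings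
def pvStep (best : Option String) (v : String) : Option String :=
  match best with
  | none => some v
  | some b => if b < v then some v else best

-- B's fold over the rows equals the running-max fold over the filtered dates
lemma pvFold_eq (evals : List (List (String × String))) (acc : Option String) :
    evals.foldl
      (fun best row => match pvRowDate row with
        | none => best
        | some v => if v = "" then best
            else match best with
              | none => some v
              | some b => if b < v then some v else best) acc
    = (evals.filterMap pvDateOf).foldl pvStep acc := by
  induction evals generalizing acc with
  | nil => rfl
  | cons r t ih =>
    rw [List.foldl_cons, List.filterMap_cons]
    have hstep : (match pvRowDate r with
        | none => acc
        | some v => if v = "" then acc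
            else match acc with
              | none => some v
              | some b => if b < v then some v else acc)
        = match pvDateOf r with
          | none => acc
          | some v => pvStep acc v := by
      simp only [pvDateOf]
      cases h : pvRowDate r with
      | none => simp
      | some v => by_cases hv : v = "" <;> simp [hv, pvStep]
    rw [hstep]
    cases hd : pvDateOf r <;> simp only [ih, List.foldl_cons]

-- the running max over a list, started at some b, is an upper bound and a member
lemma pvStep_spec (L : List String) (b : String) :
    ∃ m, L.foldl pvStep (some b) = some m ∧ (m = b ∨ m ∈ L) ∧ b ≤ m ∧ ∀ x ∈ L, x ≤ m := by
  induction L generalizing b with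
  | nil => exact ⟨b, rfl, Or.inl rfl, le_refl b, by simp⟩
  | cons v t ih =>
    by_cases h : b < v
    · obtain ⟨m, hm, hmem, hle, hub⟩ := ih v
      refine ⟨m, by simpa [pvStep, h] using hm, ?_, le_of_lt (lt_of_lt_of_le h hle), ?_⟩
      · rcases hmem with h' | h' <;> simp [h']
      · intro x hx
        rcases List.mem_cons.mp hx with rfl | hx
        · exact hle
        · exact hub x hx
    · obtain ⟨m, hm, hmem, hle, hub⟩ := ih b
      refine ⟨m, by simpa [pvStep, h] using hm, ?_, hle, ?_⟩
      · rcases hmem with h' | h' <;> simp [h']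
      · intro x hx
        rcases List.mem_cons.mp hx with rfl | hx
        · exact le_trans (le_of_not_gt h) hle
        · exact hub x hx

-- the last element of a ≤-sorted list is an upper bound
lemma pvGetLast_max (S : List String) (h : S ≠ []) (hp : S.Pairwise (· ≤ ·)) :
    ∀ x ∈ S, x ≤ S.getLast h := by
  induction S with
  | nil => exact absurd rfl h
  | cons a t ih =>
    intro x hx
    cases t with
    | nil =>
      simp only [List.mem_singleton] at hx
      subst hx; simp
    | cons c u =>
      rw [List.getLast_cons (by simp)]
      rcases List.mem_cons.mp hx with rfl | hx2
      · exact le_trans (List.rel_of_pairwise_cons hp (List.getLast_mem (by simp))) (le_refl _)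
      · exact ih (by simp) hp.of_cons x hx2

-- ===== VERDICT (by name: the statement is the Claim_ definition above) =====
theorem infer_latest_mature_cohort_spec : Claim_equal_infer_latest_mature_cohort := by
  intro a _ hpre
  unfold Spec_infer_latest_mature_cohort infer_latest_mature_cohort infer_latest_mature_cohort_alt
  set evals := PySem.Dict.getD (PySem.Dict.mk a) "evaluations" [] with hev
  rw [pvFold_eq]
  set L := evals.filterMap pvDateOf with hL
  -- L ≠ [] from Pre_
  have hLne : L ≠ [] := by
    unfold Pre_infer_latest_mature_cohort at hpre
    rw [← hev, List.any_eq_true] at hpre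
    obtain ⟨row, hrow, htr⟩ := hpre
    intro hnil
    have hall := (List.filterMap_eq_nil_iff.mp hnil) row hrow
    unfold pvDateOf pvRowDate at hall
    unfold pvRowDate at *
    cases h : PySem.Dict.get? (PySem.Dict.mk row) "snapshot_as_of_date" with
    | none => rw [h] at htr; simp at htr
    | some s =>
      rw [h] at htr hall
      by_cases hs : s = "" <;> simp [hs] at htr hall
  -- B's value: the running maximum m of L
  obtain ⟨v, t, hLc⟩ := List.exists_cons_of_ne_nil hLne
  obtain ⟨m, hm, hmem, hvle, hub⟩ := pvStep_spec t v
  have hfold : L.foldl pvStep none = some m := by rw [hLc]; simpa [pvStep] using hm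
  have hmL : m ∈ L := by
    rw [hLc]; rcases hmem with h' | h' <;> simp [h']
  have hubL : ∀ x ∈ L, x ≤ m := by
    intro x hx; rw [hLc] at hx
    rcases List.mem_cons.mp hx with rfl | hx
    · exact hvle
    · exact hub x hx
  -- A's value: the last of the sorted distinct list
  have hSne : PySem.List.sorted (PySem.Set.ofList L) (fun x => x) false ≠ [] := by
    rw [Ne, PySem.List.sorted_eq_nil_iff]
    intro h0
    have hm' := (PySem.Set.mem_ofList L m).mpr hmL
    rw [h0] at hm'
    simp at hm'
  rw [PySem.List.pyGetD_neg_one _ "" hSne, hfold]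
  have hgL : (PySem.List.sorted (PySem.Set.ofList L) (fun x => x) false).getLast hSne ∈ L :=
    (PySem.Set.mem_ofList L _).mp ((PySem.List.mem_sorted _ _ _ _).mp (List.getLast_mem hSne))
  have hmS : m ∈ PySem.List.sorted (PySem.Set.ofList L) (fun x => x) false :=
    (PySem.List.mem_sorted _ _ _ _).mpr ((PySem.Set.mem_ofList L m).mpr hmL)
  have hpair : (PySem.List.sorted (PySem.Set.ofList L) (fun x => x) false).Pairwise (· ≤ ·) :=
    (PySem.List.sorted_ofList_pairwise_lt L).imp (fun h => le_of_lt h)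
  exact le_antisymm (hubL _ hgL) (pvGetLast_max _ hSne hpair m hmS)
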